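-- pv_equiv track=rewrite | github.com/koushik-ms/yawrungay | src/yawrungay/parsing/phrases.py | _join_continuation_lines
-- ===== SOURCE A (Python) =====
-- def _join_continuation_lines(lines: list[str]) -> list[str]:
--     """Join lines that end with backslash.
--
--     Args:
--         lines: Original lines from file.
--
--     Returns:
--         Lines with continuations joined.
--     """
--     result = []
--     current = ""
--
--     for line in lines:
--         if line.rstrip().endswith("\\"):
--             current += line.rstrip()[:-1]
--         else:
--             current += line
--             if current.strip():
--                 result.append(current)
--             current = ""
--
--     if current.strip():
--         result.append(current)
--
--     return result
-- ===== SOURCE B (Python) =====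
-- def _join_continuation_lines(lines: list[str]) -> list[str]:
--     """Join lines that end with backslash (group-collecting two-pass version)."""
--     # Pass 1: partition into groups; a group ends at a non-continuation line.
--     groups = []
--     cur = []
--     for line in lines:
--         cur.append(line)
--         if not line.rstrip().endswith("\\"):
--             groups.append(cur)
--             cur = []
--     if cur:
--         groups.append(cur)
--
--     # Pass 2: render each group (drop the backslash of continuation lines),
--     # then keep only non-blank joins.
--     def render(line):
--         r = line.rstrip()
--         return r[:-1] if r.endswith("\\") else line
--
--     joined = ["".join(render(l) for l in g) for g in groups]
--     return [s for s in joined if s.strip()]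
-- ===== Notes on version B (the rewrite author's own statement) =====
-- stated objective: alternative
-- what changed: Replaced the streaming string-accumulator fold (flush current on each non-continuation line) by a collect-then-render pipeline: pass 1 partitions the lines into continuation groups, pass 2 maps each group to its joined string and filters out blank joins.
import Mathlib
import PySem

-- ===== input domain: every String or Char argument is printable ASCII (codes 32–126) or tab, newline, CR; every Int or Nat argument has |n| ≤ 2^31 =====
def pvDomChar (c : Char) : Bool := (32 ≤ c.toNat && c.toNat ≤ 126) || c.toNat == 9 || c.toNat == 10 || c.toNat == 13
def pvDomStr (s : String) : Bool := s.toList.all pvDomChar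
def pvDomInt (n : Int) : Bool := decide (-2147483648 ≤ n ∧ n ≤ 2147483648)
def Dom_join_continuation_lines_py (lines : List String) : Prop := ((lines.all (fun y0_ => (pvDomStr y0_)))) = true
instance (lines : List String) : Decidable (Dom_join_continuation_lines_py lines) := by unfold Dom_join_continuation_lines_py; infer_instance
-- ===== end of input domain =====

-- B joins continuation lines by first collecting groups, then rendering and filtering them
-- (objective: alternative decomposition, same cost).

-- ===== PORT A =====
-- streaming fold: accumulate `current` string, flush on non-continuation lines
def join_continuation_lines_py (lines : List String) : List String :=
  let st := lines.foldl (fun (p : List String × String) line =>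
    let r := PySem.Str.rstrip line
    if PySem.Str.endswith r "\\" then
      (p.1, p.2 ++ PySem.Str.slice r none (some (-1)))
    else
      let cur := p.2 ++ line
      if PySem.Str.strip cur ≠ "" then (p.1 ++ [cur], "") else (p.1, ""))
    ([], "")
  if PySem.Str.strip st.2 ≠ "" then st.1 ++ [st.2] else st.1

-- ===== PORT B =====
-- pass 1: partition lines into groups, closing a group at each non-continuation line
def pvGroupsB (lines : List String) : List (List String) :=
  let st := lines.foldl (fun (p : List (List String) × List String) line =>
    let cur := p.2 ++ [line]
    if PySem.Str.endswith (PySem.Str.rstrip line) "\\" then (p.1, cur)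
    else (p.1 ++ [cur], []))
    ([], [])
  if st.2.isEmpty then st.1 else st.1 ++ [st.2]

-- render(line): drop the trailing backslash of a continuation line
def pvRenderB (line : String) : String :=
  let r := PySem.Str.rstrip line
  if PySem.Str.endswith r "\\" then PySem.Str.slice r none (some (-1)) else line

def join_continuation_lines_py_alt (lines : List String) : List String :=
  (((pvGroupsB lines).map (fun g => PySem.Str.join "" (g.map pvRenderB))).filter
    (fun s => PySem.Str.strip s ≠ ""))

-- ===== PRECONDITION & SPEC =====
def Spec_join_continuation_lines_py (lines : List String) (out : List String) : Prop := out = join_continuation_lines_py_alt lines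
instance (lines : List String) (out : List String) : Decidable (Spec_join_continuation_lines_py lines out) := by unfold Spec_join_continuation_lines_py; infer_instance

-- ===== CLAIM (what is proved, stated in full; the proofs are below) =====
def Claim_equal_join_continuation_lines_py : Prop := ∀ (lines : List String), Dom_join_continuation_lines_py lines → Spec_join_continuation_lines_py lines (join_continuation_lines_py lines)

-- ===== LEMMAS AND PROOFS =====

-- named copies of the two fold steps and finishers (definitionally equal to the ports' lambdas)
def pvStepA (p : List String × String) (line : String) : List String × String :=
  let r := PySem.Str.rstrip line
  if PySem.Str.endswith r "\\" then
    (p.1, p.2 ++ PySem.Str.slice r none (some (-1)))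
  else
    let cur := p.2 ++ line
    if PySem.Str.strip cur ≠ "" then (p.1 ++ [cur], "") else (p.1, "")

def pvStepB (p : List (List String) × List String) (line : String) : List (List String) × List String :=
  let cur := p.2 ++ [line]
  if PySem.Str.endswith (PySem.Str.rstrip line) "\\" then (p.1, cur)
  else (p.1 ++ [cur], [])

def pvFilt (l : List String) : List String := l.filter (fun s => PySem.Str.strip s ≠ "")

def pvJoinG (g : List String) : String := PySem.Str.join "" (g.map pvRenderB)

def pvFinA (st : List String × String) : List String :=
  if PySem.Str.strip st.2 ≠ "" then st.1 ++ [st.2] else st.1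

def pvFinB (st : List (List String) × List String) : List String :=
  pvFilt ((if st.2.isEmpty then st.1 else st.1 ++ [st.2]).map pvJoinG)

lemma pvJoinG_nil : pvJoinG [] = "" := by decide

lemma pv_flatten_intersperse_nil (l : List (List Char)) :
    (List.intersperse [] l).flatten = l.flatten := by
  induction l with
  | nil => simp
  | cons a l ih =>
    cases l with
    | nil => simp
    | cons b r => simp_all [List.intersperse]

lemma pvJoin_empty_snoc (xs : List String) (y : String) :
    PySem.Str.join "" (xs ++ [y]) = PySem.Str.join "" xs ++ y := by
  have h : (PySem.Str.join "" (xs ++ [y])).toList = (PySem.Str.join "" xs ++ y).toList := by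
    simp [PySem.Str.toList_join, PySem.Chars.join, List.intercalate, pv_flatten_intersperse_nil]
  exact String.toList_inj.mp h

lemma pvJoinG_snoc (g : List String) (l : String) :
    pvJoinG (g ++ [l]) = pvJoinG g ++ pvRenderB l := by
  simp only [pvJoinG, List.map_append, List.map_cons, List.map_nil, pvJoin_empty_snoc]

lemma pvStepA_cont (p : List String × String) (line : String)
    (h : PySem.Str.endswith (PySem.Str.rstrip line) "\\" = true) :
    pvStepA p line = (p.1, p.2 ++ PySem.Str.slice (PySem.Str.rstrip line) none (some (-1))) := by
  simp only [pvStepA, h, if_true]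

lemma pvStepA_term (p : List String × String) (line : String)
    (h : PySem.Str.endswith (PySem.Str.rstrip line) "\\" = false) :
    pvStepA p line =
      if PySem.Str.strip (p.2 ++ line) ≠ "" then (p.1 ++ [p.2 ++ line], "") else (p.1, "") := by
  simp only [pvStepA, h, Bool.false_eq_true, if_false]

lemma pvStepB_cont (p : List (List String) × List String) (line : String)
    (h : PySem.Str.endswith (PySem.Str.rstrip line) "\\" = true) :
    pvStepB p line = (p.1, p.2 ++ [line]) := by
  simp only [pvStepB, h, if_true]

lemma pvStepB_term (p : List (List String) × List String) (line : String)
    (h : PySem.Str.endswith (PySem.Str.rstrip line) "\\" = false) :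
    pvStepB p line = (p.1 ++ [p.2 ++ [line]], []) := by
  simp only [pvStepB, h, Bool.false_eq_true, if_false]

lemma pvRenderB_cont (line : String)
    (h : PySem.Str.endswith (PySem.Str.rstrip line) "\\" = true) :
    pvRenderB line = PySem.Str.slice (PySem.Str.rstrip line) none (some (-1)) := by
  simp only [pvRenderB, h, if_true]

lemma pvRenderB_term (line : String)
    (h : PySem.Str.endswith (PySem.Str.rstrip line) "\\" = false) :
    pvRenderB line = line := by
  simp only [pvRenderB, h, Bool.false_eq_true, if_false]

lemma pvFilt_snoc (l : List String) (s : String) :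
    pvFilt (l ++ [s]) = if PySem.Str.strip s ≠ "" then pvFilt l ++ [s] else pvFilt l := by
  by_cases hs : PySem.Str.strip s ≠ "" <;>
    simp only [pvFilt, List.filter_append, List.filter_cons, List.filter_nil, hs, decide_not, ite_not] <;> simp [hs]

lemma pv_strip_empty : PySem.Str.strip "" = "" := by decide

-- main invariant: A's fold, started from the rendered image of B's state, finishes to B's output
lemma pv_main (rest : List String) (gs : List (List String)) (cur : List String) :
    pvFinA (rest.foldl pvStepA (pvFilt (gs.map pvJoinG), pvJoinG cur))
      = pvFinB (rest.foldl pvStepB (gs, cur)) := by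
  induction rest generalizing gs cur with
  | nil =>
    simp only [List.foldl_nil, pvFinA, pvFinB]
    cases cur with
    | nil => simp [pvJoinG_nil, pv_strip_empty, pvFilt]
    | cons a t =>
      simp only [List.isEmpty_cons, Bool.false_eq_true, if_false, List.map_append,
        List.map_cons, List.map_nil, pvFilt_snoc]
  | cons line rest ih =>
    simp only [List.foldl_cons]
    by_cases hb : PySem.Str.endswith (PySem.Str.rstrip line) "\\" = true
    · rw [pvStepA_cont _ _ hb, pvStepB_cont _ _ hb]
      have h2 : pvJoinG cur ++ PySem.Str.slice (PySem.Str.rstrip line) none (some (-1))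
          = pvJoinG (cur ++ [line]) := by
        rw [pvJoinG_snoc, pvRenderB_cont _ hb]
      rw [h2]
      exact ih gs (cur ++ [line])
    · have hb' : PySem.Str.endswith (PySem.Str.rstrip line) "\\" = false :=
        Bool.eq_false_iff.mpr hb
      rw [pvStepA_term _ _ hb', pvStepB_term _ _ hb']
      have h2 : pvJoinG cur ++ line = pvJoinG (cur ++ [line]) := by
        rw [pvJoinG_snoc, pvRenderB_term _ hb']
      have hg : pvFilt ((gs ++ [cur ++ [line]]).map pvJoinG)
          = if PySem.Str.strip (pvJoinG (cur ++ [line])) ≠ ""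
            then pvFilt (gs.map pvJoinG) ++ [pvJoinG (cur ++ [line])]
            else pvFilt (gs.map pvJoinG) := by
        rw [List.map_append, List.map_cons, List.map_nil, pvFilt_snoc]
      have := ih (gs ++ [cur ++ [line]]) []
      rw [pvJoinG_nil, hg] at this
      rw [h2]
      by_cases hs : PySem.Str.strip (pvJoinG (cur ++ [line])) ≠ ""
      · rw [if_pos hs]
        rw [if_pos hs] at this
        exact this
      · rw [if_neg hs]
        rw [if_neg hs] at this
        exact this

-- ===== VERDICT (by name: the statement is the Claim_ definition above) =====
theorem join_continuation_lines_py_spec : Claim_equal_join_continuation_lines_py := by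
  intro lines _
  unfold Spec_join_continuation_lines_py join_continuation_lines_py join_continuation_lines_py_alt pvGroupsB
  exact pv_main lines [] []
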